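-- pv_equiv track=rewrite | github.com/takuto-oono/Atcoder | opt/C-Select_Mul.py | Full_search
-- ===== SOURCE A (Python) =====
-- def Integer_convert(X):
--     x = 0
--     X_len = len(X)
--     for i in range(X_len):
--         x += 10 ** (X_len - i - 1) * X[i]
--
--     return x
--
-- def Full_search(N):
--     ans = 0
--     n = len(N)
--     for i in range(2 ** n):
--         B1 = []
--         B2 = []
--         for j in range(n):
--             if ((i >> j) & 1):
--                 B1.append(N[j])
--
--             else:
--                 B2.append(N[j])
--
--         B1.sort(reverse=True)
--         B2.sort(reverse=True)
--         l = min(len(B1), len(B2))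
--         if l == 0 or B1[0] == 0 or B2[0] == 0:
--             continue
--
--         b1 = Integer_convert(B1)
--         b2 = Integer_convert(B2)
--         ans = max(ans, b1 * b2)
--
--
--     return ans
-- ===== SOURCE B (Python) =====
-- def Full_search(N):
--     # Recursively deal each element into one of two groups, keeping both groups
--     # sorted in descending order by insertion; evaluate each complete split by
--     # Horner's rule and take the maximum over the recursion tree.
--     def value(B):
--         v = 0
--         for d in B:
--             v = v * 10 + d
--         return v
--
--     def insert_desc(B, x):
--         for k in range(len(B)):
--             if x > B[k]:
--                 return B[:k] + [x] + B[k:]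
--         return B + [x]
--
--     def go(rest, B1, B2):
--         if not rest:
--             if not B1 or not B2 or B1[0] == 0 or B2[0] == 0:
--                 return 0
--             return value(B1) * value(B2)
--         x = rest[0]
--         r = rest[1:]
--         return max(go(r, insert_desc(B1, x), B2), go(r, B1, insert_desc(B2, x)))
--
--     return go(N, [], [])
-- ===== Notes on version B (the rewrite author's own statement) =====
-- stated objective: alternative
-- what changed: Replaces the bitmask loop over range(2**n) with per-subset rebuild-and-sort by a recursion that deals each element into one of two incrementally maintained sorted groups (insertion instead of a full sort per subset) and evaluates each split by Horner's rule instead of a power sum.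
import Mathlib
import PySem

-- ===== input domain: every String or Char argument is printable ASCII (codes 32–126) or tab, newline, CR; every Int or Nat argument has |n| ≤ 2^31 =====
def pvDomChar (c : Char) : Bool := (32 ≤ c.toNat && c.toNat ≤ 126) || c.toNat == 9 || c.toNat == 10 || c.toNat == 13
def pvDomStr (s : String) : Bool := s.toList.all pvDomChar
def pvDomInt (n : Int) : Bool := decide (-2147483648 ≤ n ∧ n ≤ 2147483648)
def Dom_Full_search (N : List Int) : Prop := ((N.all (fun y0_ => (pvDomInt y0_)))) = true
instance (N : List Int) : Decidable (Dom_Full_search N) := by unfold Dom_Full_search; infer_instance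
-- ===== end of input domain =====

-- B replaces A's bitmask enumeration (rebuild + full sort per subset) by a recursion that
-- deals each element into two incrementally sorted groups and evaluates by Horner's rule
-- (objective: alternative decomposition, same exponential cost).

-- ===== PORT A =====
-- Integer_convert: the exponent X_len - i - 1 is nonnegative for every i produced by the
-- range, so `.toNat` is exact here.
def Integer_convert (X : List Int) : Int :=
  (PySem.List.pyRange 0 (X.length : Int) 1).foldl
    (fun x i => x + 10 ^ ((X.length : Int) - i - 1).toNat * PySem.List.pyGetD X i 0) 0

-- Full_search: `(i >> j) & 1` with j ≥ 0 from range(n) is `PySem.Int.band (i >>> j.toNat) 1`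
-- (exact since j ≥ 0); truthiness of the int is `≠ 0`.  Python's short-circuit `or` is the
-- ∨ here: when l = 0 the branch is taken without reading B1[0]/B2[0], so pyGetD's default
-- is never the value used.
def Full_search (N : List Int) : Int :=
  (PySem.List.pyRange 0 ((2 : Int) ^ N.length) 1).foldl (fun ans i =>
    let B := (PySem.List.pyRange 0 (N.length : Int) 1).foldl
      (fun (B : List Int × List Int) j =>
        if PySem.Int.band (i >>> j.toNat) 1 ≠ 0 then (B.1 ++ [PySem.List.pyGetD N j 0], B.2)
        else (B.1, B.2 ++ [PySem.List.pyGetD N j 0])) ([], [])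
    let B1 := PySem.List.sorted B.1 (fun x => x) true
    let B2 := PySem.List.sorted B.2 (fun x => x) true
    let l := min B1.length B2.length
    if l = 0 ∨ PySem.List.pyGetD B1 0 0 = 0 ∨ PySem.List.pyGetD B2 0 0 = 0 then ans
    else max ans (Integer_convert B1 * Integer_convert B2)) 0

-- ===== PORT B =====
def pyValue (B : List Int) : Int := B.foldl (fun v d => v * 10 + d) 0

-- insert_desc: Source B scans for the first position k with x > B[k]; this recursion places x
-- before the first strictly smaller element, exactly that position.
def insertDesc (B : List Int) (x : Int) : List Int :=
  match B with
  | [] => [x]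
  | y :: ys => if x > y then x :: y :: ys else y :: insertDesc ys x

def goB (rest B1 B2 : List Int) : Int :=
  match rest with
  | [] =>
      if B1 = [] ∨ B2 = [] ∨ PySem.List.pyGetD B1 0 0 = 0 ∨ PySem.List.pyGetD B2 0 0 = 0 then 0
      else pyValue B1 * pyValue B2
  | x :: r => max (goB r (insertDesc B1 x) B2) (goB r B1 (insertDesc B2 x))

def Full_search_alt (N : List Int) : Int := goB N [] []

-- ===== PRECONDITION & SPEC =====
def Spec_Full_search (N : List Int) (out : Int) : Prop := out = Full_search_alt N
instance (N : List Int) (out : Int) : Decidable (Spec_Full_search N out) := by unfold Spec_Full_search; infer_instance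

-- ===== CLAIM (what is proved, stated in full; the proofs are below) =====
def Claim_equal_Full_search : Prop := ∀ (N : List Int), Dom_Full_search N → Spec_Full_search N (Full_search N)

-- ===== LEMMAS AND PROOFS =====

-- descending sort as the Python `sort(reverse=True)` computes it
def sortDesc (b : List Int) : List Int := PySem.List.sorted b (fun x => x) true

-- the value A's loop body contributes for the split (b1, b2) (0 when the subset is skipped)
def leafA (b1 b2 : List Int) : Int :=
  if min (sortDesc b1).length (sortDesc b2).length = 0 ∨
     PySem.List.pyGetD (sortDesc b1) 0 0 = 0 ∨ PySem.List.pyGetD (sortDesc b2) 0 0 = 0 then 0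
  else Integer_convert (sortDesc b1) * Integer_convert (sortDesc b2)

-- the split of r selected by the bits of m (bit 0 decides the head)
def split (m : Int) : List Int → List Int × List Int
  | [] => ([], [])
  | x :: r =>
      let p := split (m >>> (1 : Nat)) r
      if PySem.Int.band m 1 ≠ 0 then (x :: p.1, p.2) else (p.1, x :: p.2)

-- all splits of r, generated structurally (head goes to group 1 first)
def parts : List Int → List (List Int × List Int)
  | [] => [([], [])]
  | x :: r => (parts r).map (fun p => (x :: p.1, p.2)) ++ (parts r).map (fun p => (p.1, x :: p.2))

-- the leaves of goB's recursion tree, in order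
def partsList (r C1 C2 : List Int) : List Int :=
  match r with
  | [] => [goB [] C1 C2]
  | x :: r' => partsList r' (insertDesc C1 x) C2 ++ partsList r' C1 (insertDesc C2 x)

theorem sum_pow_value (X : List Int) :
    ((List.range X.length).map (fun k => 10 ^ (X.length - k - 1) * X.getD k 0)).sum = pyValue X := by
  induction X using List.reverseRecOn with
  | nil => simp [pyValue]
  | append_singleton X d ih =>
      rw [List.length_append, List.length_singleton, List.range_succ]
      rw [List.map_append, List.sum_append]
      have hlast : (X.length + 1 - X.length - 1 : Nat) = 0 := by omega
      have hgd : (X ++ [d]).getD X.length 0 = d := by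
        rw [List.getD_append_right X [d] 0 X.length (le_refl _)]
        simp
      have hmap : (List.range X.length).map (fun k => 10 ^ (X.length + 1 - k - 1) * (X ++ [d]).getD k 0)
          = (List.range X.length).map (fun k => 10 * (10 ^ (X.length - k - 1) * X.getD k 0)) := by
        refine List.map_congr_left ?_
        intro k hk
        have hk' : k < X.length := List.mem_range.mp hk
        rw [List.getD_append _ _ _ _ hk']
        have he : (X.length + 1 - k - 1 : Nat) = (X.length - k - 1) + 1 := by omega
        rw [he, pow_succ]
        ring
      rw [hmap]
      have hv : pyValue (X ++ [d]) = pyValue X * 10 + d := by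
        simp [pyValue, List.foldl_append]
      rw [hv, ← ih]
      simp [List.sum_map_mul_left]
      ring

theorem lem_IC (X : List Int) : Integer_convert X = pyValue X := by
  unfold Integer_convert
  rw [PySem.List.foldl_add, PySem.List.pyRange_zero_nat, List.map_map]
  have hexp : ∀ k : Nat, ((X.length : Int) - (k : Int) - 1).toNat = X.length - k - 1 := by
    intro k; omega
  simp only [Function.comp_def, PySem.List.pyGetD_natCast, hexp]
  rw [sum_pow_value]
  simp

theorem lem_insertDesc_perm (B : List Int) (x : Int) : (insertDesc B x).Perm (x :: B) := by
  induction B with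
  | nil => simp [insertDesc]
  | cons y ys ih =>
      by_cases h : x > y
      · simp [insertDesc, h]
      · simp only [insertDesc, if_neg h]
        exact (ih.cons y).trans (List.Perm.swap x y ys)

theorem lem_insertDesc_sorted (B : List Int) (x : Int)
    (h : B.Pairwise (fun a b => b ≤ a)) : (insertDesc B x).Pairwise (fun a b => b ≤ a) := by
  induction B with
  | nil => simp [insertDesc]
  | cons y ys ih =>
      rcases List.pairwise_cons.mp h with ⟨hy, hys⟩
      by_cases hxy : x > y
      · simp only [insertDesc, if_pos hxy]
        refine List.pairwise_cons.mpr ⟨?_, h⟩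
        intro b hb
        rcases List.mem_cons.mp hb with rfl | hb
        · omega
        · exact le_of_lt (lt_of_le_of_lt (hy _ hb) hxy)
      · simp only [insertDesc, if_neg hxy]
        refine List.pairwise_cons.mpr ⟨?_, ih hys⟩
        intro b hb
        have hm := (lem_insertDesc_perm ys x).mem_iff.mp hb
        rcases List.mem_cons.mp hm with rfl | hb'
        · omega
        · exact hy _ hb'

theorem lem_foldIns_perm (b C : List Int) : (b.foldl insertDesc C).Perm (C ++ b) := by
  induction b generalizing C with
  | nil => simp
  | cons x r ih =>
      simp only [List.foldl_cons]
      refine (ih (insertDesc C x)).trans ?_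
      have h1 : (insertDesc C x ++ r).Perm ((x :: C) ++ r) :=
        (lem_insertDesc_perm C x).append_right r
      refine h1.trans ?_
      simpa using (List.perm_middle (l₁ := C) (l₂ := r) (a := x)).symm

theorem lem_foldIns_sorted (b C : List Int) (h : C.Pairwise (fun a b => b ≤ a)) :
    (b.foldl insertDesc C).Pairwise (fun a b => b ≤ a) := by
  induction b generalizing C with
  | nil => simpa
  | cons x r ih => exact ih _ (lem_insertDesc_sorted C x h)

theorem lem_sortEq (b : List Int) : b.foldl insertDesc [] = sortDesc b := by
  have hperm : (b.foldl insertDesc []).Perm (sortDesc b) := by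
    refine ((lem_foldIns_perm b []).trans ?_)
    simpa using (PySem.List.sorted_perm b (fun x => x) true).symm
  have h1 : (b.foldl insertDesc []).Pairwise (fun a c => c ≤ a) :=
    lem_foldIns_sorted b [] (by simp)
  have h2 : (sortDesc b).Pairwise (fun a c => c ≤ a) := by
    have := PySem.List.sorted_pairwise_rev b (fun x => x)
    simpa [sortDesc] using this
  exact hperm.eq_of_pairwise (fun a c _ _ hac hca => by omega) h1 h2

theorem lem_leaf (b1 b2 : List Int) :
    goB [] (b1.foldl insertDesc []) (b2.foldl insertDesc []) = leafA b1 b2 := by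
  rw [lem_sortEq, lem_sortEq]
  simp only [goB, leafA, lem_IC]
  refine if_congr ?_ rfl rfl
  rw [Nat.min_eq_zero_iff, List.length_eq_zero_iff, List.length_eq_zero_iff]
  tauto

theorem lem_inner (r : List Int) (m : Int) (acc : List Int × List Int) :
    (List.range r.length).foldl
      (fun (B : List Int × List Int) (k : Nat) =>
        if PySem.Int.band (m >>> k) 1 ≠ 0 then (B.1 ++ [r.getD k 0], B.2)
        else (B.1, B.2 ++ [r.getD k 0])) acc
      = (acc.1 ++ (split m r).1, acc.2 ++ (split m r).2) := by
  induction r generalizing m acc with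
  | nil => simp [split]
  | cons x r ih =>
      rw [List.length_cons, List.range_succ_eq_map]
      simp only [List.foldl_cons]
      simp only [List.foldl_map]
      simp only [Nat.succ_eq_add_one]
      simp only [split]
      generalize hm' : m >>> (1 : Nat) = m'
      have hsh : ∀ k : Nat, m >>> (k + 1) = m' >>> k := by
        intro k; rw [← hm', ← Int.shiftRight_add]; congr 1; omega
      simp only [hsh]
      simp only [List.getD_cons_succ, List.getD_cons_zero]
      by_cases hb : PySem.Int.band (m >>> (0 : Nat)) 1 ≠ 0
      · rw [if_pos hb, ih]
        have hb' : PySem.Int.band m 1 ≠ 0 := by simpa using hb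
        rw [if_pos hb']
        simp
      · rw [if_neg hb, ih]
        have hb' : ¬ PySem.Int.band m 1 ≠ 0 := by simpa using hb
        rw [if_neg hb']
        simp

theorem lem_split_even (j : Nat) (x : Int) (r : List Int) :
    split ((2 * j : Nat) : Int) (x :: r) = ((split (j : Int) r).1, x :: (split (j : Int) r).2) := by
  have hb : PySem.Int.band ((2 * j : Nat) : Int) 1 = 0 := by
    rw [PySem.Int.band_one, PySem.Int.mod_eq_emod_of_pos (by norm_num)]; omega
  have hs : ((2 * j : Nat) : Int) >>> (1 : Nat) = (j : Int) := by
    rw [Int.shiftRight_eq_div_pow]; push_cast; omega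
  push_cast at hb hs
  simp [split, hb, hs]

theorem lem_split_odd (j : Nat) (x : Int) (r : List Int) :
    split ((2 * j + 1 : Nat) : Int) (x :: r) = (x :: (split (j : Int) r).1, (split (j : Int) r).2) := by
  have hb : PySem.Int.band ((2 * j + 1 : Nat) : Int) 1 = 1 := by
    rw [PySem.Int.band_one, PySem.Int.mod_eq_emod_of_pos (by norm_num)]; omega
  have hs : ((2 * j + 1 : Nat) : Int) >>> (1 : Nat) = (j : Int) := by
    rw [Int.shiftRight_eq_div_pow]; push_cast; omega
  push_cast at hb hs
  simp [split, hb, hs]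

theorem perm_shuffle {α : Type} (E O : List α) (a b : α) :
    (((E ++ O) ++ [a]) ++ [b]).Perm ((E ++ [a]) ++ (O ++ [b])) := by
  have h1 : ((E ++ [a]) ++ (O ++ [b])).Perm (E ++ (O ++ [b] ++ [a])) := by
    simp only [List.append_assoc]
    exact List.Perm.append_left E
      (by simpa using (List.perm_middle (l₁ := O ++ [b]) (l₂ := ([] : List α)) (a := a)).symm)
  refine List.Perm.symm (h1.trans ?_)
  simp only [List.append_assoc]
  exact List.Perm.append_left E (List.Perm.append_left O ((List.Perm.swap b a []).symm))

theorem lem_range_split (K : Nat) :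
    (List.range (2 * K)).Perm ((List.range K).map (fun j => 2 * j) ++ (List.range K).map (fun j => 2 * j + 1)) := by
  induction K with
  | zero => simp
  | succ K ih =>
      have h2 : 2 * (K + 1) = (2 * K + 1) + 1 := by omega
      rw [h2, List.range_succ, List.range_succ, List.range_succ]
      simp only [List.map_append, List.map_cons, List.map_nil]
      have := ((ih.append_right [2 * K]).append_right [2 * K + 1]).trans
        (perm_shuffle ((List.range K).map (fun j => 2 * j)) ((List.range K).map (fun j => 2 * j + 1)) (2 * K) (2 * K + 1))
      simpa using this

theorem lem_parts_perm (r : List Int) :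
    ((List.range (2 ^ r.length)).map (fun q : Nat => split (q : Int) r)).Perm (parts r) := by
  induction r with
  | nil => simp [parts, split, List.range_one]
  | cons x r ih =>
      rw [List.length_cons, show 2 ^ (r.length + 1) = 2 * 2 ^ r.length from by ring]
      refine ((lem_range_split (2 ^ r.length)).map _).trans ?_
      rw [List.map_append, List.map_map, List.map_map]
      have h1 : (List.range (2 ^ r.length)).map ((fun q : Nat => split (q : Int) (x :: r)) ∘ fun j => 2 * j)
          = ((List.range (2 ^ r.length)).map (fun j : Nat => split (j : Int) r)).map (fun p => (p.1, x :: p.2)) := by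
        rw [List.map_map]
        refine List.map_congr_left ?_
        intro j _
        simpa using lem_split_even j x r
      have h2 : (List.range (2 ^ r.length)).map ((fun q : Nat => split (q : Int) (x :: r)) ∘ fun j => 2 * j + 1)
          = ((List.range (2 ^ r.length)).map (fun j : Nat => split (j : Int) r)).map (fun p => (x :: p.1, p.2)) := by
        rw [List.map_map]
        refine List.map_congr_left ?_
        intro j _
        simpa using lem_split_odd j x r
      rw [h1, h2]
      refine (List.perm_append_comm).trans ?_
      exact (ih.map _).append (ih.map _)

theorem lem_partsList (r C1 C2 : List Int) :
    partsList r C1 C2 = (parts r).map (fun p => goB [] (p.1.foldl insertDesc C1) (p.2.foldl insertDesc C2)) := by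
  induction r generalizing C1 C2 with
  | nil => simp [partsList, parts]
  | cons x r ih =>
      simp only [partsList, parts, List.map_append, List.map_map]
      rw [ih, ih]
      rfl

theorem lem_go (r C1 C2 : List Int) (a : Int) :
    (partsList r C1 C2).foldl max a = max a (goB r C1 C2) := by
  induction r generalizing C1 C2 a with
  | nil => simp [partsList, goB]
  | cons x r ih =>
      simp only [partsList, goB, List.foldl_append]
      rw [ih, ih, max_assoc]

theorem goB_nonneg (r C2 : List Int) : 0 ≤ goB r [] C2 := by
  induction r generalizing C2 with
  | nil => simp [goB]
  | cons x r ih => exact le_trans (ih (insertDesc C2 x)) (le_max_right _ _)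

theorem lem_maxfold {α : Type} (L : List α) (P : α → Prop) [DecidablePred P] (f : α → Int)
    (a : Int) (ha : 0 ≤ a) :
    L.foldl (fun ans q => if P q then ans else max ans (f q)) a
      = L.foldl (fun ans q => max ans (if P q then 0 else f q)) a := by
  induction L generalizing a with
  | nil => rfl
  | cons q L ih =>
      simp only [List.foldl_cons]
      by_cases h : P q
      · simp only [if_pos h]
        rw [ih a ha, max_eq_left ha]
      · simp only [if_neg h]
        exact ih _ (le_trans ha (le_max_left _ _))

-- the skip condition and the product A's loop body computes for subset number q
def condA (N : List Int) (q : Nat) : Bool :=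
  decide (min (sortDesc (split (q : Int) N).1).length (sortDesc (split (q : Int) N).2).length = 0 ∨
    PySem.List.pyGetD (sortDesc (split (q : Int) N).1) 0 0 = 0 ∨
    PySem.List.pyGetD (sortDesc (split (q : Int) N).2) 0 0 = 0)

def prodA (N : List Int) (q : Nat) : Int :=
  Integer_convert (sortDesc (split (q : Int) N).1) * Integer_convert (sortDesc (split (q : Int) N).2)

theorem lem_leafA_eq (N : List Int) (q : Nat) :
    leafA (split (q : Int) N).1 (split (q : Int) N).2 = if condA N q then 0 else prodA N q := by
  simp only [leafA, condA, prodA, decide_eq_true_eq]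

theorem lem_A_char (N : List Int) :
    Full_search N
      = ((List.range (2 ^ N.length)).map
          (fun q : Nat => leafA (split (q : Int) N).1 (split (q : Int) N).2)).foldl max 0 := by
  unfold Full_search
  rw [show ((2 : Int) ^ N.length) = ((2 ^ N.length : Nat) : Int) from by push_cast; ring,
    PySem.List.pyRange_zero_nat (2 ^ N.length), List.foldl_map, List.foldl_map]
  have hleaf : ∀ q : Nat, leafA (split (q : Int) N).1 (split (q : Int) N).2
      = if condA N q then 0 else prodA N q := lem_leafA_eq N
  simp only [hleaf]
  rw [← lem_maxfold (List.range (2 ^ N.length)) (fun q => condA N q = true) (prodA N) 0 (le_refl 0)]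
  refine PySem.List.foldl_congr_mem _ _ _ _ ?_
  intro acc q _
  rw [PySem.List.pyRange_zero_nat N.length, List.foldl_map]
  simp only [Int.toNat_natCast, PySem.List.pyGetD_natCast]
  rw [lem_inner]
  simp only [List.nil_append]
  simp [condA, prodA, sortDesc]

-- ===== VERDICT (by name: the statement is the Claim_ definition above) =====
theorem Full_search_spec : Claim_equal_Full_search := by
  intro N _
  unfold Spec_Full_search
  rw [lem_A_char]
  have hperm : ((List.range (2 ^ N.length)).map
      (fun q : Nat => leafA (split (q : Int) N).1 (split (q : Int) N).2)).Perm
      ((parts N).map (fun p => leafA p.1 p.2)) := by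
    have h := (lem_parts_perm N).map (fun p => leafA p.1 p.2)
    simpa [List.map_map, Function.comp_def] using h
  rw [List.Perm.foldl_op_eq hperm]
  have hmap : (parts N).map (fun p => leafA p.1 p.2)
      = (parts N).map (fun p => goB [] (p.1.foldl insertDesc []) (p.2.foldl insertDesc [])) :=
    List.map_congr_left (fun p _ => (lem_leaf p.1 p.2).symm)
  rw [hmap, ← lem_partsList, lem_go]
  unfold Full_search_alt
  exact max_eq_right (goB_nonneg N [])
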